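-- pv_equiv track=rewrite | github.com/zeshengli98/Leetcode | HackRank/expedia-01.py | pairTeams
-- ===== SOURCE A (Python) =====
-- from collections import defaultdict
--
-- def pairTeams(skill):
--     onegroup = sum(skill)//(len(skill)//2)
--     dic = defaultdict(lambda :0)
--     for eff in skill:
--         dic[eff] += 1
--
--     res = 0
--     for key in dic.keys():
--         other = onegroup - key
--         if other not in dic.keys():
--             return -1
--         if dic[key] != dic[other]:
--             return -1
--         res += dic[key] * key * other
--
--     return res//2
-- ===== SOURCE B (Python) =====
-- def pairTeams(skill):
--     target = sum(skill) // (len(skill) // 2)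
--     s = sorted(skill)
--     n = len(s)
--     res = 0
--     for i in range(n):
--         x = s[i]
--         y = s[n - 1 - i]
--         if x + y != target:
--             return -1
--         res += x * y
--     return res // 2
-- ===== Notes on version B (the rewrite author's own statement) =====
-- stated objective: alternative
-- what changed: Replaces the hash-count symmetry check over distinct keys by sorting the list and pairing each element with its mirror from the other end (full range with a final //2 to keep the exact double-counted total).
import Mathlib
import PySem

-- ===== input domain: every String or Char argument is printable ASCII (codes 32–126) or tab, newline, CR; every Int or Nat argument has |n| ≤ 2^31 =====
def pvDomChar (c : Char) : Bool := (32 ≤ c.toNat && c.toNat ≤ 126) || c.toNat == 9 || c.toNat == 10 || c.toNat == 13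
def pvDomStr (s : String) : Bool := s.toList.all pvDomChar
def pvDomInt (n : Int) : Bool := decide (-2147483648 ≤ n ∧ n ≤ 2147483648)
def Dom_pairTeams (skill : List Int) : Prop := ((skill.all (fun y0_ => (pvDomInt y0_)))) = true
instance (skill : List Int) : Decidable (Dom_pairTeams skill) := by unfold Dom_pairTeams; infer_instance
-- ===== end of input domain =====

-- B replaces A's hash-count symmetry check with sort + mirror pairing over the sorted list (different algorithm; C-level sort vs Python-level dict loop).

-- ===== PORT A =====
-- the 'for key in dic.keys()' loop with its two early returns and the final res//2
def pairTeamsA_loop (dic : PySem.Dict Int Int) (onegroup : Int) : List Int → Int → Int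
  | [], res => PySem.Int.floordiv res 2
  | key :: ks, res =>
    let other := onegroup - key
    if dic.contains other = false then -1
    else if dic.getD key 0 ≠ dic.getD other 0 then -1
    else pairTeamsA_loop dic onegroup ks (res + dic.getD key 0 * key * other)

def pairTeams (skill : List Int) : Int :=
  let onegroup := PySem.Int.floordiv skill.sum (PySem.Int.floordiv (skill.length : Int) 2)
  let dic := skill.foldl (fun d eff => d.modify eff 0 (· + 1)) PySem.Dict.empty
  pairTeamsA_loop dic onegroup dic.keys 0

-- ===== PORT B =====
-- the 'for i in range(n)' loop with its early return and the final res//2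
def pairTeamsB_loop (s : List Int) (n : Int) (target : Int) : List Int → Int → Int
  | [], res => PySem.Int.floordiv res 2
  | i :: is, res =>
    let x := PySem.List.pyGetD s i 0
    let y := PySem.List.pyGetD s (n - 1 - i) 0
    if x + y ≠ target then -1
    else pairTeamsB_loop s n target is (res + x * y)

def pairTeams_alt (skill : List Int) : Int :=
  let target := PySem.Int.floordiv skill.sum (PySem.Int.floordiv (skill.length : Int) 2)
  let s := PySem.List.sorted skill (fun x => x) false
  let n : Int := (s.length : Int)
  pairTeamsB_loop s n target (PySem.List.pyRange 0 n 1) 0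

-- ===== PRECONDITION & SPEC =====
-- Pre_ excludes exactly the lists of length < 2, on which both A and B raise ZeroDivisionError (len(skill)//2 == 0).
def Pre_pairTeams (skill : List Int) : Prop := 2 ≤ skill.length
instance (skill : List Int) : Decidable (Pre_pairTeams skill) := by unfold Pre_pairTeams; infer_instance
def pvWitness_pairTeams : List Int := ([1, 3])
def Spec_pairTeams (skill : List Int) (out : Int) : Prop := out = pairTeams_alt skill
instance (skill : List Int) (out : Int) : Decidable (Spec_pairTeams skill out) := by unfold Spec_pairTeams; infer_instance

-- ===== CLAIM (what is proved, stated in full; the proofs are below) =====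
def Claim_equal_pairTeams : Prop := ∀ (skill : List Int), Dom_pairTeams skill → Pre_pairTeams skill → Spec_pairTeams skill (pairTeams skill)

-- ===== LEMMAS AND PROOFS =====

theorem aloop_char (dic : PySem.Dict Int Int) (t : Int) (ks : List Int) (res : Int) :
    pairTeamsA_loop dic t ks res =
      if ∀ k ∈ ks, dic.contains (t - k) = true ∧ dic.getD k 0 = dic.getD (t - k) 0 then
        PySem.Int.floordiv (res + (ks.map (fun k => dic.getD k 0 * k * (t - k))).sum) 2
      else -1 := by
  induction ks generalizing res with
  | nil => simp [pairTeamsA_loop]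
  | cons k ks ih =>
    simp only [pairTeamsA_loop]
    by_cases h1 : dic.contains (t - k) = true
    · by_cases h2 : dic.getD k 0 = dic.getD (t - k) 0
      · rw [if_neg (by simp [h1]), if_neg (not_not_intro h2), ih]
        by_cases h3 : ∀ x ∈ ks, dic.contains (t - x) = true ∧ dic.getD x 0 = dic.getD (t - x) 0
        · rw [if_pos h3, if_pos (List.forall_mem_cons.2 ⟨⟨h1, h2⟩, h3⟩), List.map_cons,
            List.sum_cons]
          congr 1
          ring
        · rw [if_neg h3, if_neg (fun hall => h3 (List.forall_mem_cons.1 hall).2)]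
      · rw [if_neg (by simp [h1]), if_pos h2,
          if_neg (fun hall => h2 (List.forall_mem_cons.1 hall).1.2)]
    · rw [if_pos (by simpa using h1),
        if_neg (fun hall => h1 (List.forall_mem_cons.1 hall).1.1)]

theorem bloop_char (s : List Int) (n t : Int) (is : List Int) (res : Int) :
    pairTeamsB_loop s n t is res =
      if ∀ i ∈ is, PySem.List.pyGetD s i 0 + PySem.List.pyGetD s (n - 1 - i) 0 = t then
        PySem.Int.floordiv (res + (is.map (fun i => PySem.List.pyGetD s i 0 * PySem.List.pyGetD s (n - 1 - i) 0)).sum) 2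
      else -1 := by
  induction is generalizing res with
  | nil => simp [pairTeamsB_loop]
  | cons i is ih =>
    simp only [pairTeamsB_loop]
    by_cases h1 : PySem.List.pyGetD s i 0 + PySem.List.pyGetD s (n - 1 - i) 0 = t
    · rw [if_neg (not_not_intro h1), ih]
      by_cases h3 : ∀ j ∈ is, PySem.List.pyGetD s j 0 + PySem.List.pyGetD s (n - 1 - j) 0 = t
      · have hall : ∀ j ∈ i :: is, PySem.List.pyGetD s j 0 + PySem.List.pyGetD s (n - 1 - j) 0 = t := by
          intro j hj
          rcases List.mem_cons.1 hj with h | h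
          · subst h; exact h1
          · exact h3 j h
        rw [if_pos h3, if_pos hall, List.map_cons, List.sum_cons]
        congr 1
        ring
      · rw [if_neg h3, if_neg (fun hall => h3 (fun j hj => hall j (List.mem_cons_of_mem _ hj)))]
    · rw [if_pos h1, if_neg (fun hall => h1 (hall i (by simp)))]

-- the symmetric-multiset characterisation: sorted mirror pairs all sum to t ↔ counts symmetric under x ↦ t - x
theorem mirror_iff_sym (l : List Int) (t : Int)
    (hs : l.Pairwise (fun a b => a ≤ b)) :
    (∀ (i : Nat) (h : i < l.length), l[i] + l[l.length - 1 - i]'(by omega) = t) ↔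
      (∀ k ∈ l, (t - k) ∈ l ∧ List.count k l = List.count (t - k) l) := by
  have hinj : Function.Injective (fun x : Int => t - x) := fun a b h => by
    simpa using h
  constructor
  · intro hI
    have hmap : l.map (fun x => t - x) = l.reverse := by
      apply List.ext_getElem
      · simp
      · intro i h1 h2
        simp only [List.getElem_map, List.getElem_reverse]
        have := hI i (by simpa using h1)
        omega
    intro k hk
    constructor
    · have hmem : t - k ∈ l.map (fun x => t - x) := List.mem_map.2 ⟨k, hk, rfl⟩
      rw [hmap, List.mem_reverse] at hmem
      exact hmem
    · have h1 : List.count (t - k) (l.map (fun x => t - x)) = List.count k l := by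
        have h0 := List.count_map_of_injective l (fun x : Int => t - x) hinj k
        simpa using h0
      rw [hmap, List.count_reverse] at h1
      exact h1.symm
  · intro hC
    have hcnt : ∀ k : Int, List.count k l = List.count (t - k) l := by
      intro k
      by_cases hk : k ∈ l
      · exact (hC k hk).2
      · have h0 : List.count k l = 0 := List.count_eq_zero.2 hk
        by_cases hk2 : (t - k) ∈ l
        · have h5 := (hC (t - k) hk2).2
          have hsimp : t - (t - k) = k := by ring
          rw [hsimp] at h5
          have h6 := List.count_pos_iff.2 hk2
          omega
        · rw [h0, List.count_eq_zero.2 hk2]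
    have hperm : (l.map (fun x => t - x)).Perm l := by
      rw [List.perm_iff_count]
      intro a
      have h1 : List.count a (l.map (fun x => t - x)) = List.count (t - a) l := by
        have h0 := List.count_map_of_injective l (fun x : Int => t - x) hinj (t - a)
        simpa using h0
      have h2 := hcnt (t - a)
      have e : t - (t - a) = a := by ring
      rw [e] at h2
      rw [h1]
      exact h2
    have hrs : ((l.map (fun x => t - x)).reverse).Pairwise (fun a b : Int => a ≤ b) := by
      rw [List.pairwise_reverse]
      exact List.Pairwise.map _ (fun a b (h : a ≤ b) => by omega) hs
    have heq : (l.map (fun x => t - x)).reverse = l :=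
      List.eq_of_perm_of_sorted (fun a b _ _ h1 h2 => le_antisymm h1 h2) hrs hs
        (((l.map (fun x => t - x)).reverse_perm).trans hperm)
    intro i h
    have h2 := List.getElem_of_eq heq (i := i) (by simpa using h)
    rw [List.getElem_reverse, List.getElem_map] at h2
    simp only [List.length_map] at h2
    omega

-- grouping: the per-distinct-key sum with multiplicities equals the per-element sum
theorem keysum_eq_elemsum (xs : List Int) (g : Int → Int) :
    ((PySem.Set.ofList xs : List Int).map (fun k => (List.count k xs : Int) * g k)).sum
      = (xs.map g).sum := by
  have hnd : (PySem.Set.ofList xs : List Int).Nodup := PySem.Set.nodup_ofList xs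
  have htf : (PySem.Set.ofList xs : List Int).toFinset = xs.toFinset := by
    ext a
    simp [List.mem_toFinset, PySem.Set.mem_ofList]
  have h1 := List.sum_toFinset (fun k => (List.count k xs : Int) * g k) hnd
  rw [← h1, htf]
  have h2 := Finset.sum_multiset_map_count (xs : Multiset Int) g
  simp only [Multiset.map_coe, Multiset.sum_coe, Multiset.coe_count] at h2
  have h3 : (xs : Multiset Int).toFinset = xs.toFinset := rfl
  rw [h2, h3]
  apply Finset.sum_congr rfl
  intro m _
  simp

theorem pairTeams_eq (skill : List Int) : pairTeams skill = pairTeams_alt skill := by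
  unfold pairTeams pairTeams_alt
  set t := PySem.Int.floordiv skill.sum (PySem.Int.floordiv (skill.length : Int) 2) with ht
  rw [← PySem.Dict.counter_eq_foldl, aloop_char, bloop_char]
  set l := PySem.List.sorted skill (fun x => x) false with hl
  have hperm : l.Perm skill := PySem.List.sorted_perm skill (fun x => x) false
  have hsorted : l.Pairwise (fun a b : Int => a ≤ b) := PySem.List.sorted_pairwise skill (fun x => x)
  have hlen : l.length = skill.length := hperm.length_eq
  have hcondA : (∀ k ∈ (PySem.Dict.counter skill).keys,
        (PySem.Dict.counter skill).contains (t - k) = true ∧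
        (PySem.Dict.counter skill).getD k 0 = (PySem.Dict.counter skill).getD (t - k) 0)
      ↔ (∀ k ∈ l, (t - k) ∈ l ∧ List.count k l = List.count (t - k) l) := by
    rw [PySem.Dict.keys_counter]
    constructor
    · intro h k hk
      have hks : k ∈ skill := hperm.mem_iff.1 hk
      have h2 := h k ((PySem.Set.mem_ofList skill k).2 hks)
      rw [PySem.Dict.contains_counter, PySem.Dict.getD_counter, PySem.Dict.getD_counter] at h2
      constructor
      · exact hperm.mem_iff.2 (List.contains_iff_mem.1 h2.1)
      · have h4 : List.count k skill = List.count (t - k) skill := by exact_mod_cast h2.2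
        rw [hperm.count_eq, hperm.count_eq]
        exact h4
    · intro h k hk
      have hks : k ∈ skill := (PySem.Set.mem_ofList skill k).1 hk
      have h2 := h k (hperm.mem_iff.2 hks)
      rw [PySem.Dict.contains_counter, PySem.Dict.getD_counter, PySem.Dict.getD_counter]
      constructor
      · exact List.contains_iff_mem.2 (hperm.mem_iff.1 h2.1)
      · have h4 : List.count k l = List.count (t - k) l := h2.2
        rw [hperm.count_eq, hperm.count_eq] at h4
        exact_mod_cast h4
  have hcondB : (∀ i ∈ PySem.List.pyRange 0 (l.length : Int) 1,
        PySem.List.pyGetD l i 0 + PySem.List.pyGetD l ((l.length : Int) - 1 - i) 0 = t)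
      ↔ (∀ (i : Nat) (h : i < l.length), l[i] + l[l.length - 1 - i]'(by omega) = t) := by
    constructor
    · intro h i hi
      have hmem : (i : Int) ∈ PySem.List.pyRange 0 (l.length : Int) 1 := by
        rw [PySem.List.mem_pyRange_one]
        omega
      have h2 := h (i : Int) hmem
      rw [PySem.List.pyGetD_eq_getElem l (i := (i : Int)) 0 (by omega) (by omega),
          PySem.List.pyGetD_eq_getElem l (i := (l.length : Int) - 1 - (i : Int)) 0 (by omega)
            (by omega)] at h2
      have e1 : ((i : Int)).toNat = i := by omega
      have e2 : (((l.length : Int) - 1 - (i : Int))).toNat = l.length - 1 - i := by omega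
      simp only [e1, e2] at h2
      exact h2
    · intro h i hi
      rw [PySem.List.mem_pyRange_one] at hi
      have h2 := h i.toNat (by omega)
      rw [PySem.List.pyGetD_eq_getElem l (i := i) 0 (by omega) (by omega),
          PySem.List.pyGetD_eq_getElem l (i := (l.length : Int) - 1 - i) 0 (by omega) (by omega)]
      have e2 : (((l.length : Int) - 1 - i)).toNat = l.length - 1 - i.toNat := by omega
      simp only [e2]
      exact h2
  simp only [hcondA, hcondB, mirror_iff_sym l t hsorted]
  by_cases hc : ∀ k ∈ l, (t - k) ∈ l ∧ List.count k l = List.count (t - k) l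
  · rw [if_pos hc, if_pos hc]
    have hI := (mirror_iff_sym l t hsorted).2 hc
    have hA : (((PySem.Dict.counter skill).keys).map
          (fun k => (PySem.Dict.counter skill).getD k 0 * k * (t - k))).sum
        = (skill.map (fun x => x * (t - x))).sum := by
      rw [PySem.Dict.keys_counter, ← keysum_eq_elemsum skill (fun x => x * (t - x))]
      apply congrArg
      apply List.map_congr_left
      intro k _
      rw [PySem.Dict.getD_counter]
      ring
    have hB : ((PySem.List.pyRange 0 (l.length : Int) 1).map
          (fun i => PySem.List.pyGetD l i 0 * PySem.List.pyGetD l ((l.length : Int) - 1 - i) 0)).sum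
        = (skill.map (fun x => x * (t - x))).sum := by
      have hmc : (PySem.List.pyRange 0 (l.length : Int) 1).map
            (fun i => PySem.List.pyGetD l i 0 * PySem.List.pyGetD l ((l.length : Int) - 1 - i) 0)
          = l.map (fun x => x * (t - x)) := by
        rw [PySem.List.pyRange_zero_nat, List.map_map]
        apply List.ext_getElem
        · simp
        · intro i h1 h2
          have hi : i < l.length := by simpa using h2
          simp only [List.getElem_map, List.getElem_range, Function.comp_apply]
          rw [PySem.List.pyGetD_eq_getElem l (i := (i : Int)) 0 (by omega) (by omega),
              PySem.List.pyGetD_eq_getElem l (i := (l.length : Int) - 1 - (i : Int)) 0 (by omega)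
                (by omega)]
          have e1 : ((i : Int)).toNat = i := by omega
          have e2 : (((l.length : Int) - 1 - (i : Int))).toNat = l.length - 1 - i := by omega
          simp only [e1, e2]
          have h5 := hI i hi
          have hy : l[l.length - 1 - i]'(by omega) = t - l[i]'hi := by omega
          rw [hy]
      rw [hmc]
      exact (hperm.map (fun x => x * (t - x))).sum_eq
    rw [hA, hB]
  · rw [if_neg hc, if_neg hc]

-- ===== VERDICT (by name: the statement is the Claim_ definition above) =====
theorem pairTeams_spec : Claim_equal_pairTeams := by
  intro skill _ _
  unfold Spec_pairTeams
  exact pairTeams_eq skill
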